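-- pv_equiv track=rewrite | github.com/Leon-AW/Experimenting_Reasoning_on_SLMs | reasoning_methods/hybrid/prepare_datasets.py | generate_arithmetic_scratchpad
-- ===== SOURCE A (Python) =====
-- def generate_arithmetic_scratchpad(num1_str, num2_str):
--     """Generates the scratchpad rationale for adding two numbers."""
--     n_digits = len(num1_str) # Assume equal length, padded if necessary
--     scratchpad_lines = []
--     carry = 0
--     result_so_far = ""
--
--     for i in range(n_digits - 1, -1, -1):
--         d1 = int(num1_str[i])
--         d2 = int(num2_str[i])
--         current_sum = d1 + d2 + carry
--         digit_sum = current_sum % 10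
--         new_carry = current_sum // 10
--
--         # Format scratchpad line
--         line = f"{d1} + {d2}"
--         if carry > 0:
--             line += f" + {carry}"
--         line += f" = {current_sum}"
--
--         result_so_far = str(digit_sum) + result_so_far
--
--         scratchpad_lines.append(f"{line} , {result_so_far} C: {new_carry}")
--         carry = new_carry
--
--     # Handle final carry if any
--     if carry > 0:
--         result_so_far = str(carry) + result_so_far
--         scratchpad_lines.append(f"carry = {carry}, {result_so_far} C: 0") # No more carry
--
--     # Reverse lines for correct order and add final formatting
--     final_scratchpad = "<scratch>"
--     final_scratchpad += f"{num1_str} + {num2_str} , C: 0" # Initial state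
--     final_scratchpad += "".join(reversed(scratchpad_lines))
--     final_scratchpad += f"</scratch>"
--     return final_scratchpad, result_so_far
-- ===== SOURCE B (Python) =====
-- def generate_arithmetic_scratchpad(num1_str, num2_str):
--     """Two-pass version: first build the full addition table (one row of
--     (d1, d2, carry_in, sum, digit, carry_out) per position) and the complete
--     result string; then format the lines most-significant-first, taking each
--     partial result as a suffix slice of the final digit string."""
--     n = len(num1_str)
--
--     # Pass 1: compute the addition table, least significant position first.
--     rows = []
--     carry = 0
--     for i in range(n - 1, -1, -1):
--         d1 = int(num1_str[i])
--         d2 = int(num2_str[i])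
--         s = d1 + d2 + carry
--         rows.append((d1, d2, carry, s, s % 10, s // 10))
--         carry = s // 10
--
--     final_digits = "".join(str(r[4]) for r in reversed(rows))
--     result = (str(carry) if carry > 0 else "") + final_digits
--
--     # Pass 2: format, most significant position first.
--     lines = []
--     if carry > 0:
--         lines.append(f"carry = {carry}, {result} C: 0")
--     for k, (d1, d2, cin, s, ds, cout) in enumerate(reversed(rows)):
--         term = f" + {cin}" if cin > 0 else ""
--         lines.append(f"{d1} + {d2}{term} = {s} , {final_digits[k:]} C: {cout}")
--
--     scratchpad = ("<scratch>" + f"{num1_str} + {num2_str} , C: 0"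
--                   + "".join(lines) + "</scratch>")
--     return scratchpad, result
-- ===== Notes on version B (the rewrite author's own statement) =====
-- stated objective: alternative
-- what changed: B replaces A's single loop that interleaves formatting with string-prepending by a two-pass decomposition: it first builds the complete addition table (d1, d2, carry_in, sum, digit, carry_out) and the final digit string, then formats the lines most-significant-first, taking each partial result as a suffix slice of the final digit string.
import Mathlib
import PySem

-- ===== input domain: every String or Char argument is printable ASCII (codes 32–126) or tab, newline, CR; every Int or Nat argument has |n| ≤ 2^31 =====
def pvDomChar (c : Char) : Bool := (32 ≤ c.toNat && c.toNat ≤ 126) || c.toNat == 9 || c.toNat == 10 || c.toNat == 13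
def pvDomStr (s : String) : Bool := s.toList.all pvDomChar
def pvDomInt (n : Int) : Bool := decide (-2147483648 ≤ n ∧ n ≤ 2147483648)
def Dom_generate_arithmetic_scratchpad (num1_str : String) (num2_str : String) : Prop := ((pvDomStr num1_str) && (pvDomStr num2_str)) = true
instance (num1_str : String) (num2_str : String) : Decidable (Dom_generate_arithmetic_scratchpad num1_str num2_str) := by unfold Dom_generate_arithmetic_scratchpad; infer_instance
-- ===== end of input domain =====

-- B rebuilds the scratchpad in two passes (addition table first, then formatting with
-- suffix slices of the final digit string) instead of A's single pass with string prepending;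
-- objective: alternative decomposition, same cost.

-- ===== PORT A =====
-- int(s[i]) for one character: IndexError / ValueError return none and are excluded by Pre_;
-- the .getD 0 default is never reached inside Pre_.
def pvDigitAt (cs : List Char) (i : Int) : Int :=
  ((PySem.List.pyGet? cs i).bind (fun c => PySem.Int.ofChars? [c])).getD 0

def generate_arithmetic_scratchpad (num1_str : String) (num2_str : String) : String × String :=
  let cs1 := num1_str.toList
  let cs2 := num2_str.toList
  let n : Int := cs1.length
  let st :=
    (PySem.List.pyRange (n - 1) (-1) (-1)).foldl
      (fun (st : List (List Char) × Int × List Char) i =>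
        let d1 := pvDigitAt cs1 i
        let d2 := pvDigitAt cs2 i
        let current_sum := d1 + d2 + st.2.1
        let digit_sum := PySem.Int.mod current_sum 10
        let new_carry := PySem.Int.floordiv current_sum 10
        let line := PySem.Int.toChars d1 ++ (" + ").toList ++ PySem.Int.toChars d2
        let line := if st.2.1 > 0 then line ++ (" + ").toList ++ PySem.Int.toChars st.2.1 else line
        let line := line ++ (" = ").toList ++ PySem.Int.toChars current_sum
        let res := PySem.Int.toChars digit_sum ++ st.2.2
        (st.1 ++ [line ++ (" , ").toList ++ res ++ (" C: ").toList ++ PySem.Int.toChars new_carry],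
         new_carry, res))
      ([], 0, [])
  let st2 :=
    if st.2.1 > 0 then
      (st.1 ++ [("carry = ").toList ++ PySem.Int.toChars st.2.1 ++ (", ").toList ++
                  (PySem.Int.toChars st.2.1 ++ st.2.2) ++ (" C: 0").toList],
       PySem.Int.toChars st.2.1 ++ st.2.2)
    else (st.1, st.2.2)
  let sp := ("<scratch>").toList ++ (cs1 ++ (" + ").toList ++ cs2 ++ (" , C: 0").toList) ++
            st2.1.reverse.flatten ++ ("</scratch>").toList
  (String.ofList sp, String.ofList st2.2)

-- ===== PORT B =====
def generate_arithmetic_scratchpad_alt (num1_str : String) (num2_str : String) : String × String :=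
  let cs1 := num1_str.toList
  let cs2 := num2_str.toList
  let n : Int := cs1.length
  -- pass 1: the addition table, least significant position first
  let p :=
    (PySem.List.pyRange (n - 1) (-1) (-1)).foldl
      (fun (st : List (Int × Int × Int × Int × Int × Int) × Int) i =>
        let d1 := pvDigitAt cs1 i
        let d2 := pvDigitAt cs2 i
        let s := d1 + d2 + st.2
        (st.1 ++ [(d1, d2, st.2, s, PySem.Int.mod s 10, PySem.Int.floordiv s 10)],
         PySem.Int.floordiv s 10))
      ([], 0)
  let final_digits := (p.1.reverse.map (fun r => PySem.Int.toChars r.2.2.2.2.1)).flatten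
  let result := (if p.2 > 0 then PySem.Int.toChars p.2 else []) ++ final_digits
  -- pass 2: format, most significant position first
  let lines0 :=
    if p.2 > 0 then
      [("carry = ").toList ++ PySem.Int.toChars p.2 ++ (", ").toList ++ result ++ (" C: 0").toList]
    else []
  let lines := lines0 ++
    (PySem.List.enumerate p.1.reverse 0).map (fun kr =>
      PySem.Int.toChars kr.2.1 ++ (" + ").toList ++ PySem.Int.toChars kr.2.2.1 ++
      (if kr.2.2.2.1 > 0 then (" + ").toList ++ PySem.Int.toChars kr.2.2.2.1 else []) ++
      (" = ").toList ++ PySem.Int.toChars kr.2.2.2.2.1 ++ (" , ").toList ++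
      PySem.List.slice final_digits (some kr.1) none ++
      (" C: ").toList ++ PySem.Int.toChars kr.2.2.2.2.2.2)
  let sp := ("<scratch>").toList ++ (cs1 ++ (" + ").toList ++ cs2 ++ (" , C: 0").toList) ++
            lines.flatten ++ ("</scratch>").toList
  (String.ofList sp, String.ofList result)

-- ===== PRECONDITION & SPEC =====
-- Pre_ excludes exactly the inputs on which A raises (IndexError when num2_str is shorter
-- than num1_str, ValueError when an accessed character is not a decimal digit).
def Pre_generate_arithmetic_scratchpad (num1_str : String) (num2_str : String) : Prop :=
  num1_str.toList.all Char.isDigit = true ∧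
  num1_str.toList.length ≤ num2_str.toList.length ∧
  (num2_str.toList.take num1_str.toList.length).all Char.isDigit = true
instance (num1_str : String) (num2_str : String) : Decidable (Pre_generate_arithmetic_scratchpad num1_str num2_str) := by unfold Pre_generate_arithmetic_scratchpad; infer_instance

def pvWitness_generate_arithmetic_scratchpad : String × String := ("97", "15")

def Spec_generate_arithmetic_scratchpad (num1_str : String) (num2_str : String) (out : String × String) : Prop := out = generate_arithmetic_scratchpad_alt num1_str num2_str
instance (num1_str : String) (num2_str : String) (out : String × String) : Decidable (Spec_generate_arithmetic_scratchpad num1_str num2_str out) := by unfold Spec_generate_arithmetic_scratchpad; infer_instance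

-- ===== CLAIM (what is proved, stated in full; the proofs are below) =====
def Claim_equal_generate_arithmetic_scratchpad : Prop := ∀ (num1_str : String) (num2_str : String), Dom_generate_arithmetic_scratchpad num1_str num2_str → Pre_generate_arithmetic_scratchpad num1_str num2_str → Spec_generate_arithmetic_scratchpad num1_str num2_str (generate_arithmetic_scratchpad num1_str num2_str)

-- ===== LEMMAS AND PROOFS =====

-- the addition table (shared characterisation of both loops) and A's derived data
def pvRows (cs1 cs2 : List Char) : List Int → Int → List (Int × Int × Int × Int × Int × Int)
  | [], _ => []
  | i :: is, c =>
    (pvDigitAt cs1 i, pvDigitAt cs2 i, c, pvDigitAt cs1 i + pvDigitAt cs2 i + c,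
      PySem.Int.mod (pvDigitAt cs1 i + pvDigitAt cs2 i + c) 10,
      PySem.Int.floordiv (pvDigitAt cs1 i + pvDigitAt cs2 i + c) 10) ::
    pvRows cs1 cs2 is (PySem.Int.floordiv (pvDigitAt cs1 i + pvDigitAt cs2 i + c) 10)

def pvCarry (cs1 cs2 : List Char) : List Int → Int → Int
  | [], c => c
  | i :: is, c => pvCarry cs1 cs2 is (PySem.Int.floordiv (pvDigitAt cs1 i + pvDigitAt cs2 i + c) 10)

def pvDs (r : Int × Int × Int × Int × Int × Int) : List Char := PySem.Int.toChars r.2.2.2.2.1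

def pvFmt (r : Int × Int × Int × Int × Int × Int) (part : List Char) : List Char :=
  PySem.Int.toChars r.1 ++ (" + ").toList ++ PySem.Int.toChars r.2.1 ++
  (if r.2.2.1 > 0 then (" + ").toList ++ PySem.Int.toChars r.2.2.1 else []) ++
  (" = ").toList ++ PySem.Int.toChars r.2.2.2.1 ++ (" , ").toList ++ part ++
  (" C: ").toList ++ PySem.Int.toChars r.2.2.2.2.2

def pvLinesA : List (Int × Int × Int × Int × Int × Int) → List Char → List (List Char)
  | [], _ => []
  | r :: rest, acc => pvFmt r (pvDs r ++ acc) :: pvLinesA rest (pvDs r ++ acc)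

def pvRes : List (Int × Int × Int × Int × Int × Int) → List Char → List Char
  | [], acc => acc
  | r :: rest, acc => pvRes rest (pvDs r ++ acc)

theorem pvFoldA (cs1 cs2 : List Char) (L : List Int) :
    ∀ (ls : List (List Char)) (c : Int) (acc : List Char),
    L.foldl
      (fun (st : List (List Char) × Int × List Char) i =>
        let d1 := pvDigitAt cs1 i
        let d2 := pvDigitAt cs2 i
        let current_sum := d1 + d2 + st.2.1
        let digit_sum := PySem.Int.mod current_sum 10
        let new_carry := PySem.Int.floordiv current_sum 10
        let line := PySem.Int.toChars d1 ++ (" + ").toList ++ PySem.Int.toChars d2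
        let line := if st.2.1 > 0 then line ++ (" + ").toList ++ PySem.Int.toChars st.2.1 else line
        let line := line ++ (" = ").toList ++ PySem.Int.toChars current_sum
        let res := PySem.Int.toChars digit_sum ++ st.2.2
        (st.1 ++ [line ++ (" , ").toList ++ res ++ (" C: ").toList ++ PySem.Int.toChars new_carry],
         new_carry, res))
      (ls, c, acc) =
    (ls ++ pvLinesA (pvRows cs1 cs2 L c) acc, pvCarry cs1 cs2 L c, pvRes (pvRows cs1 cs2 L c) acc) := by
  induction L with
  | nil => intro ls c acc; simp [pvRows, pvCarry, pvLinesA, pvRes]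
  | cons i is ih =>
    intro ls c acc
    simp only [List.foldl_cons]
    rw [ih]
    by_cases hc : c > 0 <;>
      simp [pvRows, pvCarry, pvLinesA, pvRes, pvFmt, pvDs, hc, List.append_assoc]

theorem pvFoldB (cs1 cs2 : List Char) (L : List Int) :
    ∀ (rs : List (Int × Int × Int × Int × Int × Int)) (c : Int),
    L.foldl
      (fun (st : List (Int × Int × Int × Int × Int × Int) × Int) i =>
        let d1 := pvDigitAt cs1 i
        let d2 := pvDigitAt cs2 i
        let s := d1 + d2 + st.2
        (st.1 ++ [(d1, d2, st.2, s, PySem.Int.mod s 10, PySem.Int.floordiv s 10)],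
         PySem.Int.floordiv s 10))
      (rs, c) =
    (rs ++ pvRows cs1 cs2 L c, pvCarry cs1 cs2 L c) := by
  induction L with
  | nil => intro rs c; simp [pvRows, pvCarry]
  | cons i is ih =>
    intro rs c
    simp only [List.foldl_cons]
    rw [ih]
    simp [pvRows, pvCarry, List.append_assoc]

theorem pvRes_eq (R : List (Int × Int × Int × Int × Int × Int)) :
    ∀ acc, pvRes R acc = (R.reverse.map pvDs).flatten ++ acc := by
  induction R with
  | nil => intro acc; simp [pvRes]
  | cons r rest ih => intro acc; simp [pvRes, ih, List.append_assoc]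

theorem pvToCharsLen (m : Int) (h0 : 0 ≤ m) (h1 : m < 10) : (PySem.Int.toChars m).length = 1 := by
  interval_cases m <;> decide

theorem pvFlatten_len (R : List (Int × Int × Int × Int × Int × Int))
    (h : ∀ r ∈ R, (pvDs r).length = 1) : ((R.map pvDs).flatten).length = R.length := by
  induction R with
  | nil => simp
  | cons r rest ih =>
    have h1 := h r (by simp)
    have h2 : ∀ x ∈ rest, (pvDs x).length = 1 := fun x hx => h x (by simp [hx])
    simp [h1, ih h2]; omega

theorem pvRows_ds (cs1 cs2 : List Char) (L : List Int) :
    ∀ c, ∀ r ∈ pvRows cs1 cs2 L c, (pvDs r).length = 1 := by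
  induction L with
  | nil => intro c r hr; simp [pvRows] at hr
  | cons i is ih =>
    intro c r hr
    simp only [pvRows, List.mem_cons] at hr
    rcases hr with rfl | hr
    · exact pvToCharsLen _ (PySem.Int.mod_nonneg _ (by norm_num)) (PySem.Int.mod_lt _ (by norm_num))
    · exact ih _ r hr

theorem pvLinesA_rev (R : List (Int × Int × Int × Int × Int × Int))
    (h : ∀ r ∈ R, (pvDs r).length = 1) :
    ∀ acc, (pvLinesA R acc).reverse =
      (PySem.List.enumerate R.reverse 0).map (fun kr =>
        pvFmt kr.2 ((((R.reverse.map pvDs).flatten).drop kr.1.toNat) ++ acc)) := by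
  induction R with
  | nil => intro acc; simp [pvLinesA]
  | cons r rest ih =>
    intro acc
    have hrest : ∀ x ∈ rest, (pvDs x).length = 1 := fun x hx => h x (by simp [hx])
    have hlen : ((List.map pvDs rest).reverse.flatten).length = rest.length := by
      have := pvFlatten_len rest.reverse (fun x hx => hrest x (List.mem_reverse.mp hx))
      simpa [List.map_reverse] using this
    simp only [pvLinesA, List.reverse_cons, PySem.List.enumerate_append, List.map_append]
    rw [ih hrest (pvDs r ++ acc)]
    congr 1
    · apply List.map_congr_left
      intro kr hkr
      obtain ⟨k, hk, rfl⟩ := (PySem.List.mem_enumerate_iff _ _ _).mp hkr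
      have hkle : k ≤ ((List.map pvDs rest).reverse.flatten).length := by
        simp at hk; omega
      simp only [List.map_reverse, List.map_cons, List.map_nil, List.flatten_append]
      rw [show ((0 : Int) + (k : Int)).toNat = k by omega]
      rw [List.drop_append_of_le_length (by simpa using hkle)]
      simp [List.append_assoc]
    · simp only [PySem.List.enumerate_cons, PySem.List.enumerate_nil, List.map_cons,
        List.map_nil, List.map_reverse, List.flatten_append]
      rw [show ((0 : Int) + ((rest.reverse.length : Nat) : Int)).toNat =
            ((List.map pvDs rest).reverse.flatten).length by simp [hlen]]
      simp

-- ===== VERDICT (by name: the statement is the Claim_ definition above) =====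
theorem generate_arithmetic_scratchpad_spec : Claim_equal_generate_arithmetic_scratchpad := by
  intro s1 s2 _ _
  unfold Spec_generate_arithmetic_scratchpad generate_arithmetic_scratchpad
    generate_arithmetic_scratchpad_alt
  simp only [pvFoldA, pvFoldB, List.nil_append]
  set L := PySem.List.pyRange ((s1.toList.length : Int) - 1) (-1) (-1) with hL
  set R := pvRows s1.toList s2.toList L 0 with hR
  set C := pvCarry s1.toList s2.toList L 0 with hC
  have hds : ∀ r ∈ R, (pvDs r).length = 1 := pvRows_ds _ _ _ _
  have hres : pvRes R [] = (R.reverse.map pvDs).flatten := by simpa using pvRes_eq R []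
  have hfun : (fun (r : Int × Int × Int × Int × Int × Int) =>
      PySem.Int.toChars r.2.2.2.2.1) = pvDs := rfl
  have hmap : (PySem.List.enumerate R.reverse 0).map (fun kr =>
      PySem.Int.toChars kr.2.1 ++ (" + ").toList ++ PySem.Int.toChars kr.2.2.1 ++
      (if kr.2.2.2.1 > 0 then (" + ").toList ++ PySem.Int.toChars kr.2.2.2.1 else []) ++
      (" = ").toList ++ PySem.Int.toChars kr.2.2.2.2.1 ++ (" , ").toList ++
      PySem.List.slice ((R.reverse.map (fun r => PySem.Int.toChars r.2.2.2.2.1)).flatten)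
        (some kr.1) none ++
      (" C: ").toList ++ PySem.Int.toChars kr.2.2.2.2.2.2) = (pvLinesA R []).reverse := by
    rw [pvLinesA_rev R hds []]
    apply List.map_congr_left
    intro kr hkr
    obtain ⟨k, hk, rfl⟩ := (PySem.List.mem_enumerate_iff _ _ _).mp hkr
    simp [pvFmt, hfun, List.append_assoc, PySem.List.slice_from_natCast]
  simp only [hmap]
  simp only [hres, hfun]
  by_cases hCpos : C > 0
  · simp [hCpos, List.reverse_append, List.append_assoc]
  · simp [hCpos, List.append_assoc]
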